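-- pv_equiv track=rewrite | github.com/varchous/1 | crawlerfile.py | separatewords
-- ===== SOURCE A (Python) =====
-- def separatewords(text):
--     k = [".", ",", "(", ")", "!", "?", ":", ";", "'", '"', "1", "2", "3", "4", "5", "6", "7", "8", "9", "0", "-",
--          "+", "=", "*", "/", "%"]
--     text = text.lower()
--     for i in k:
--         text = text.replace(i, '')
--     l = (text.split())
--     #print (l)
--     #splitter = re.compile(u"[^a-zа-я]")
--     #return [s.lower() for s in splitter.split(text) if s != '']
--     return l
-- ===== SOURCE B (Python) =====
-- def separatewords(text):
--     delset = frozenset(".,()!?:;'\"1234567890-+=*/%")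
--     return ''.join(c for c in text.lower() if c not in delset).split()
-- ===== Notes on version B (the rewrite author's own statement) =====
-- stated objective: simpler
-- what changed: Replaced A's 26 sequential whole-string replace passes (one per delimiter) by a single character-level pass that drops characters found in a frozenset, then splits.
import Mathlib
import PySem

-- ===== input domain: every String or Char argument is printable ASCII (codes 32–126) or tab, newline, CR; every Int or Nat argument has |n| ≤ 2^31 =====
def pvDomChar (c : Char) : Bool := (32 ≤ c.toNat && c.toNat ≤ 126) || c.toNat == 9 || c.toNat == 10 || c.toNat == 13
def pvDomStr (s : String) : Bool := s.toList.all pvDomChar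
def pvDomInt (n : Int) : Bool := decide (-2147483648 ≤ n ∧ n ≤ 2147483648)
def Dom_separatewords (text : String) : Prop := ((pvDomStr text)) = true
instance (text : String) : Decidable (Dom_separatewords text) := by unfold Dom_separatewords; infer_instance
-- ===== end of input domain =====

-- B replaces A's 26 sequential whole-string replace passes with one character-level
-- filter pass over the lowered text (objective: simpler).

-- ===== PORT A =====
-- the delimiter list k from A, in order
def pvK : List String :=
  [".", ",", "(", ")", "!", "?", ":", ";", "'", "\"", "1", "2", "3", "4", "5", "6",
   "7", "8", "9", "0", "-", "+", "=", "*", "/", "%"]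

def separatewords (text : String) : List String :=
  let text := PySem.Str.lower text
  let text := pvK.foldl (fun t i => PySem.Str.replace t i "") text
  PySem.Str.split₀ text

-- ===== PORT B =====
-- B's frozenset of delimiter characters
def pvDelset : List Char :=
  ['.', ',', '(', ')', '!', '?', ':', ';', '\'', '"', '1', '2', '3', '4', '5', '6',
   '7', '8', '9', '0', '-', '+', '=', '*', '/', '%']

def separatewords_alt (text : String) : List String :=
  PySem.Str.split₀
    (String.ofList ((PySem.Str.lower text).toList.filter (fun c => !pvDelset.contains c)))

-- ===== PRECONDITION & SPEC =====
def Spec_separatewords (text : String) (out : List String) : Prop := out = separatewords_alt text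
instance (text : String) (out : List String) : Decidable (Spec_separatewords text out) := by unfold Spec_separatewords; infer_instance

-- ===== CLAIM (what is proved, stated in full; the proofs are below) =====
def Claim_equal_separatewords : Prop := ∀ (text : String), Dom_separatewords text → Spec_separatewords text (separatewords text)

-- ===== LEMMAS AND PROOFS =====

-- deleting a single character by replace is filtering it out
theorem replace_go_single (c : Char) :
    ∀ (l : List Char) (fuel : Nat) (acc : List Char), l.length ≤ fuel →
      PySem.Chars.replace.go [c] [] fuel l acc = acc.reverse ++ l.filter (fun d => !(d == c)) := by
  intro l
  induction l with
  | nil =>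
      intro fuel acc _
      cases fuel <;> simp [PySem.Chars.replace.go]
  | cons x t ih =>
      intro fuel acc h
      cases fuel with
      | zero => simp at h
      | succ n =>
          simp only [PySem.Chars.replace.go]
          by_cases hx : x = c
          · subst hx
            simp [List.isPrefixOf, ih n acc (by simpa using h)]
          · have hpre : ([c].isPrefixOf (x :: t)) = false := by
              simp [List.isPrefixOf, Ne.symm hx]
            simp [hpre, ih n (x :: acc) (by simpa using h), hx]

theorem replace_single (c : Char) (s : List Char) :
    PySem.Chars.replace s [c] [] = s.filter (fun d => !(d == c)) := by
  simp [PySem.Chars.replace, replace_go_single c s s.length [] (le_refl _)]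

theorem foldl_replace_eq_filter (cs : List Char) :
    ∀ (t : String),
      ((cs.map (fun c => String.ofList [c])).foldl (fun t i => PySem.Str.replace t i "") t).toList
        = t.toList.filter (fun d => !cs.contains d) := by
  induction cs with
  | nil => intro t; simp
  | cons c cs ih =>
      intro t
      simp only [List.map_cons, List.foldl_cons]
      rw [ih]
      have h1 : (PySem.Str.replace t (String.ofList [c]) "").toList
          = t.toList.filter (fun d => !(d == c)) := by
        rw [PySem.Str.toList_replace]
        simpa [String.toList_ofList] using replace_single c t.toList
      rw [h1, List.filter_filter]
      apply List.filter_congr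
      intro d _
      simp only [List.contains_cons]
      cases h : d == c <;> simp

set_option maxRecDepth 8192 in
set_option maxHeartbeats 1000000 in
theorem pvK_eq : pvK = pvDelset.map (fun c => String.ofList [c]) := by decide

-- ===== VERDICT (by name: the statement is the Claim_ definition above) =====
theorem separatewords_spec : Claim_equal_separatewords := by
  intro text _
  unfold Spec_separatewords separatewords separatewords_alt
  have key : pvK.foldl (fun t i => PySem.Str.replace t i "") (PySem.Str.lower text)
      = String.ofList ((PySem.Str.lower text).toList.filter (fun c => !pvDelset.contains c)) := by
    have h := foldl_replace_eq_filter pvDelset (PySem.Str.lower text)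
    rw [← pvK_eq] at h
    rw [← h, String.ofList_toList]
  exact congrArg PySem.Str.split₀ key
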